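-- pv_equiv track=rewrite | github.com/drexelai/sparsity-in-binary-neural-nets | src/main.py | calculate_model_architecture
-- ===== SOURCE A (Python) =====
-- def calculate_model_architecture(ihls, df):
--     """
--     @params: ihls: Initial hidden layer size
--     @params: df: division factor
--     """
--     matrix = []
--     if ihls <0 or df<1: return matrix
--     current_layer_size = ihls
--     matrix.append(current_layer_size)
--     while current_layer_size // df > 1:
--         current_layer_size = current_layer_size // df
--         matrix.append(current_layer_size)
--     return matrix
-- ===== SOURCE B (Python) =====
-- def calculate_model_architecture(ihls, df):
--     """
--     @params: ihls: Initial hidden layer size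
--     @params: df: division factor
--     """
--     if ihls < 0 or df < 1:
--         return []
--     k, p = 0, df
--     while 2 * p <= ihls:
--         k += 1
--         p *= df
--     return [ihls // df ** j for j in range(k + 1)]
-- ===== Notes on version B (the rewrite author's own statement) =====
-- stated objective: alternative
-- what changed: B never builds the list in the loop: it only counts the number k of powers df^j with 2*df^j <= ihls, then emits the whole result as the closed-form comprehension [ihls // df**j for j in range(k+1)], using floor(floor(x/p)/d) = floor(x/(p*d)), instead of A's chained floor division through a mutable running layer size appended element by element.
import Mathlib
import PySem

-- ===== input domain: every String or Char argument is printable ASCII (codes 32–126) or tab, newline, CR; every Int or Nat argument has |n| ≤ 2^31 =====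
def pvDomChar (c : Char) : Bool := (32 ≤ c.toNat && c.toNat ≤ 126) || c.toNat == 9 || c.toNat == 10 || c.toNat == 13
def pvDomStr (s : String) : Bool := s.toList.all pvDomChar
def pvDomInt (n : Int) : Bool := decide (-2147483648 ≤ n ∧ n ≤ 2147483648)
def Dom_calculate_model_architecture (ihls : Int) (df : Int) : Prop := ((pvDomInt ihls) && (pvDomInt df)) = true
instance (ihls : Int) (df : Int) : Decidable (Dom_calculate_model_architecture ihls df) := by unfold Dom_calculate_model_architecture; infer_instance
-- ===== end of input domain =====

-- B only counts how many powers df^j satisfy 2*df^j ≤ ihls, then produces the whole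
-- list as a closed-form map over range(k+1), instead of A's element-by-element
-- appends of a mutable running quotient; objective: alternative (same cost).

-- ===== PORT A =====
-- A's while loop, fueled (fuel ihls.natAbs + 1 is never exhausted when A terminates;
-- when df = 1 and ihls ≥ 2 the Python loop diverges — excluded by Pre_ below).
def pvAwhile : Nat → Int → Int → List Int → List Int
  | 0, _, _, matrix => matrix
  | fuel+1, df, current, matrix =>
    if 1 < PySem.Int.floordiv current df then
      pvAwhile fuel df (PySem.Int.floordiv current df)
        (matrix ++ [PySem.Int.floordiv current df])
    else matrix

def calculate_model_architecture (ihls : Int) (df : Int) : List Int :=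
  if ihls < 0 ∨ df < 1 then []
  else pvAwhile (ihls.natAbs + 1) df ihls [ihls]

-- ===== PORT B =====
-- B's counting loop: how many powers df, df², … satisfy 2*p ≤ ihls (fueled like A's).
def pvCount : Nat → Int → Int → Int → Nat
  | 0, _, _, _ => 0
  | fuel+1, df, p, ihls => if 2 * p ≤ ihls then pvCount fuel df (p * df) ihls + 1 else 0

def calculate_model_architecture_alt (ihls : Int) (df : Int) : List Int :=
  if ihls < 0 ∨ df < 1 then []
  else (List.range (pvCount (ihls.natAbs + 1) df df ihls + 1)).map
        (fun j => PySem.Int.floordiv ihls (df ^ j))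

-- ===== PRECONDITION & SPEC =====
-- Pre_ excludes df = 1 with ihls ≥ 2, where A's while loop never terminates
-- (the Python A diverges there, returning nothing).
def Pre_calculate_model_architecture (ihls : Int) (df : Int) : Prop :=
  ¬ (df = 1 ∧ 2 ≤ ihls)
instance (ihls : Int) (df : Int) : Decidable (Pre_calculate_model_architecture ihls df) := by
  unfold Pre_calculate_model_architecture; infer_instance

def pvWitness_calculate_model_architecture : Int × Int := (100, 3)

def Spec_calculate_model_architecture (ihls : Int) (df : Int) (out : List Int) : Prop :=
  out = calculate_model_architecture_alt ihls df
instance (ihls : Int) (df : Int) (out : List Int) : Decidable (Spec_calculate_model_architecture ihls df out) := by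
  unfold Spec_calculate_model_architecture; infer_instance

-- ===== CLAIM (what is proved, stated in full; the proofs are below) =====
def Claim_equal_calculate_model_architecture : Prop :=
  ∀ (ihls : Int) (df : Int), Dom_calculate_model_architecture ihls df →
    Pre_calculate_model_architecture ihls df →
    Spec_calculate_model_architecture ihls df (calculate_model_architecture ihls df)

-- ===== LEMMAS AND PROOFS =====

lemma fd_fd (x p d : Int) (hp : 0 < p) (hd : 0 < d) :
    PySem.Int.floordiv (PySem.Int.floordiv x p) d = PySem.Int.floordiv x (p * d) := by
  rw [PySem.Int.floordiv_eq_ediv_of_pos hp, PySem.Int.floordiv_eq_ediv_of_pos hd,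
    PySem.Int.floordiv_eq_ediv_of_pos (mul_pos hp hd)]
  exact Int.ediv_ediv_of_nonneg hp.le

lemma cond_iff (x q : Int) (hq : 0 < q) :
    (1 < PySem.Int.floordiv x q) ↔ 2 * q ≤ x := by
  have h2 := PySem.Int.le_floordiv_iff_mul_le (a := x) (b := q) (q := 2) hq
  omega

-- A's loop from state ihls // df^j equals the mapped range built from B's count.
lemma loop_eq (fuel : Nat) : ∀ (df ihls : Int) (j : Nat) (m : List Int), 1 < df →
    pvAwhile fuel df (PySem.Int.floordiv ihls (df ^ j)) m
      = m ++ (List.range (pvCount fuel df (df ^ (j+1)) ihls)).map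
          (fun i => PySem.Int.floordiv ihls (df ^ (j+1+i))) := by
  induction fuel with
  | zero => intro df ihls j m _; simp [pvAwhile, pvCount]
  | succ n ih =>
    intro df ihls j m hdf
    have hpj : (0:Int) < df ^ j := pow_pos (by omega) j
    have hpj1 : (0:Int) < df ^ (j+1) := pow_pos (by omega) (j+1)
    have hstep : PySem.Int.floordiv (PySem.Int.floordiv ihls (df ^ j)) df
        = PySem.Int.floordiv ihls (df ^ (j+1)) := by
      rw [fd_fd ihls (df ^ j) df hpj (by omega), pow_succ]
    simp only [pvAwhile, pvCount, hstep, cond_iff ihls (df ^ (j+1)) hpj1]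
    split
    · rw [ih df ihls (j+1) (m ++ [PySem.Int.floordiv ihls (df ^ (j+1))]) hdf,
        List.range_succ_eq_map,
        show df ^ (j+1) * df = df ^ (j+1+1) from (pow_succ df (j+1)).symm]
      simp only [List.append_assoc, List.singleton_append, List.map_cons, List.map_map,
        Nat.add_zero]
      congr 1
      congr 1
      apply List.map_congr_left; intro i _
      simp only [Function.comp_apply]
      congr 2
      omega
    · simp

-- ===== VERDICT (by name: the statement is the Claim_ definition above) =====
theorem calculate_model_architecture_spec : Claim_equal_calculate_model_architecture := by
  intro ihls df _ hpre
  unfold Spec_calculate_model_architecture calculate_model_architecture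
    calculate_model_architecture_alt
  by_cases h : ihls < 0 ∨ df < 1
  · simp [h]
  · push Not at h
    obtain ⟨hi, hdf1⟩ := h
    simp only [if_neg (by omega : ¬ (ihls < 0 ∨ df < 1))]
    by_cases hdf : df = 1
    · -- df = 1: Pre_ forces ihls ≤ 1, both loops stop immediately
      unfold Pre_calculate_model_architecture at hpre
      subst hdf
      have hc : ¬ (1 < PySem.Int.floordiv ihls 1) := by
        rw [cond_iff ihls 1 (by omega)]; omega
      have hc2 : ¬ (2 * (1:Int) ≤ ihls) := by omega
      have e1 : pvAwhile (ihls.natAbs + 1) 1 ihls [ihls] = [ihls] := by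
        simp only [pvAwhile, if_neg hc]
      have e2 : pvCount (ihls.natAbs + 1) 1 1 ihls = 0 := by
        simp only [pvCount, if_neg hc2]
      rw [e1, e2]
      simp [List.range_one]
    · have hdf2 : (1:Int) < df := by omega
      have h0 : PySem.Int.floordiv ihls (df ^ (0:Nat)) = ihls := by
        rw [pow_zero, PySem.Int.floordiv_eq_ediv_of_pos (by omega)]; simp
      calc pvAwhile (ihls.natAbs + 1) df ihls [ihls]
          = pvAwhile (ihls.natAbs + 1) df (PySem.Int.floordiv ihls (df ^ (0:Nat))) [ihls] := by
            rw [h0]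
        _ = [ihls] ++ (List.range (pvCount (ihls.natAbs + 1) df (df ^ (1:Nat)) ihls)).map
              (fun i => PySem.Int.floordiv ihls (df ^ (0+1+i))) :=
            loop_eq (ihls.natAbs + 1) df ihls 0 [ihls] hdf2
        _ = (List.range (pvCount (ihls.natAbs + 1) df df ihls + 1)).map
              (fun j => PySem.Int.floordiv ihls (df ^ j)) := by
            rw [List.range_succ_eq_map]
            simp only [List.map_cons, List.map_map, pow_one, pow_zero,
              List.singleton_append]
            rw [show PySem.Int.floordiv ihls 1 = ihls from by
              rw [PySem.Int.floordiv_eq_ediv_of_pos (by omega)]; simp]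
            congr 1
            congr 1
            funext i
            simp only [Function.comp_apply]
            congr 2
            omega
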